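-- pv_equiv track=rewrite | github.com/chaitanya100100/TailorNet | utils/geometry.py | get_vert_opposites_per_edge
-- ===== SOURCE A (Python) =====
-- def get_vert_opposites_per_edge(mesh_v, mesh_f):
--     """Returns a dictionary from vertidx-pairs to opposites.
--     For example, a key consist of [4,5)] meaning the edge between
--     vertices 4 and 5, and a value might be [10,11] which are the indices
--     of the vertices opposing this edge.
--
--     Copied from opendr library.
--     """
--     result = {}
--     for f in mesh_f:
--         for i in range(3):
--             key = [f[i], f[(i+1)%3]]
--             key.sort()
--             key = tuple(key)
--             val = f[(i+2)%3]
--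
--             if key in result:
--                 result[key].append(val)
--             else:
--                 result[key] = [val]
--     return result
-- ===== SOURCE B (Python) =====
-- def get_vert_opposites_per_edge(mesh_v, mesh_f):
--     """Staged passes instead of incremental dict grouping: list every
--     (edge, opposite) incidence, take the distinct edges in first-appearance
--     order, then for each edge scan the incidence stream for its opposites."""
--     incid = []
--     for f in mesh_f:
--         for a, b, c in ((f[0], f[1], f[2]), (f[1], f[2], f[0]), (f[2], f[0], f[1])):
--             incid.append(((min(a, b), max(a, b)), c))
--     edges = list(dict.fromkeys(k for k, _ in incid))
--     return {e: [v for k, v in incid if k == e] for e in edges}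
-- ===== Notes on version B (the rewrite author's own statement) =====
-- stated objective: alternative
-- what changed: A groups opposites into a dict incrementally while looping over faces; B instead materialises the flat (edge, opposite) incidence list, extracts the distinct edges in first-appearance order with dict.fromkeys, and builds each edge's value list by an independent filtering scan of the incidence list per edge.
import Mathlib
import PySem

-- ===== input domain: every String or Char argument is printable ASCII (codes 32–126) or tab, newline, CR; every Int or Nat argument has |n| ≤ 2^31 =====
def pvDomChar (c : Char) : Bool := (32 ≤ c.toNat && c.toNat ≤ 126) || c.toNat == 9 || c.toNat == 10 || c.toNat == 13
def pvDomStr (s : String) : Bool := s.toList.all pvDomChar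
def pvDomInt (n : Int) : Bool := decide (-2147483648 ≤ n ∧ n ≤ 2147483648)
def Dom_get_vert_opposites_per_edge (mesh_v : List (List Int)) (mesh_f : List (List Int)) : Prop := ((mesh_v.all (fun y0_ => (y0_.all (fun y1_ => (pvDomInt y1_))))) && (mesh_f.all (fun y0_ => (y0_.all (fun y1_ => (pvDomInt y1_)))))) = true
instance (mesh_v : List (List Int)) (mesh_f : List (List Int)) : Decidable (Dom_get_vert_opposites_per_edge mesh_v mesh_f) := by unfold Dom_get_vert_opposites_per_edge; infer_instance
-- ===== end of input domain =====

-- B replaces A's incremental dict grouping by staged passes: the flat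
-- (edge, opposite) incidence list, its distinct edges in first-appearance
-- order, then one filtering scan of the incidence list per edge ('alternative').

-- ===== PORT A =====
def get_vert_opposites_per_edge (mesh_v : List (List Int)) (mesh_f : List (List Int)) : List (Int × Int × List Int) :=
  let result : PySem.Dict (Int × Int) (List Int) :=
    mesh_f.foldl (fun result f =>
      (PySem.List.pyRange 0 3 1).foldl (fun result i =>
        let keyL := PySem.List.sorted
          [PySem.List.pyGetD f i 0, PySem.List.pyGetD f (PySem.Int.mod (i+1) 3) 0]
          (fun x => x) false
        let key : Int × Int := (PySem.List.pyGetD keyL 0 0, PySem.List.pyGetD keyL 1 0)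
        let val := PySem.List.pyGetD f (PySem.Int.mod (i+2) 3) 0
        if result.contains key then result.modify key [] (fun l => l ++ [val])
        else result.insert key [val]) result) PySem.Dict.empty
  result.items.map (fun p => (p.1.1, p.1.2, p.2))

-- ===== PORT B =====
def get_vert_opposites_per_edge_alt (mesh_v : List (List Int)) (mesh_f : List (List Int)) : List (Int × Int × List Int) :=
  let incid : List ((Int × Int) × Int) :=
    mesh_f.foldl (fun acc f =>
      let f0 := PySem.List.pyGetD f 0 0
      let f1 := PySem.List.pyGetD f 1 0
      let f2 := PySem.List.pyGetD f 2 0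
      acc ++ [((min f0 f1, max f0 f1), f2), ((min f1 f2, max f1 f2), f0),
              ((min f2 f0, max f2 f0), f1)]) []
  let edges : List (Int × Int) := PySem.List.dedup (incid.map (fun p => p.1))
  edges.map (fun e =>
    (e.1, e.2, (incid.filter (fun p => p.1 == e)).map (fun p => p.2)))

-- ===== PRECONDITION & SPEC =====
-- Pre_ excludes faces with fewer than 3 entries, on which A raises IndexError.
def Pre_get_vert_opposites_per_edge (mesh_v : List (List Int)) (mesh_f : List (List Int)) : Prop :=
  ∀ f ∈ mesh_f, 3 ≤ f.length
instance (mesh_v : List (List Int)) (mesh_f : List (List Int)) : Decidable (Pre_get_vert_opposites_per_edge mesh_v mesh_f) := by unfold Pre_get_vert_opposites_per_edge; infer_instance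
def pvWitness_get_vert_opposites_per_edge : List (List Int) × List (List Int) :=
  ([[0, 0, 0]], [[0, 1, 2], [1, 2, 3]])
def Spec_get_vert_opposites_per_edge (mesh_v : List (List Int)) (mesh_f : List (List Int)) (out : List (Int × Int × List Int)) : Prop := out = get_vert_opposites_per_edge_alt mesh_v mesh_f
instance (mesh_v : List (List Int)) (mesh_f : List (List Int)) (out : List (Int × Int × List Int)) : Decidable (Spec_get_vert_opposites_per_edge mesh_v mesh_f out) := by unfold Spec_get_vert_opposites_per_edge; infer_instance

-- ===== CLAIM (what is proved, stated in full; the proofs are below) =====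
def Claim_equal_get_vert_opposites_per_edge : Prop := ∀ (mesh_v : List (List Int)) (mesh_f : List (List Int)), Dom_get_vert_opposites_per_edge mesh_v mesh_f → Pre_get_vert_opposites_per_edge mesh_v mesh_f → Spec_get_vert_opposites_per_edge mesh_v mesh_f (get_vert_opposites_per_edge mesh_v mesh_f)

-- ===== LEMMAS AND PROOFS =====

-- the grouping step A's dict loop reduces to, named for the proofs
def pvStepB (d : PySem.Dict (Int × Int) (List Int)) (p : (Int × Int) × Int) : PySem.Dict (Int × Int) (List Int) :=
  d.modify p.1 [] (fun l => l ++ [p.2])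

-- the three (edge, opposite) incidences of one face
def pvFacePairs (f : List Int) : List ((Int × Int) × Int) :=
  let f0 := PySem.List.pyGetD f 0 0
  let f1 := PySem.List.pyGetD f 1 0
  let f2 := PySem.List.pyGetD f 2 0
  [((min f0 f1, max f0 f1), f2), ((min f1 f2, max f1 f2), f0), ((min f2 f0, max f2 f0), f1)]

-- sorting a two-element list
lemma sorted_pair (x y : Int) :
    PySem.List.sorted [x, y] (fun x => x) false = if x ≤ y then [x, y] else [y, x] := by
  by_cases hxy : x ≤ y
  · rw [if_pos hxy]
    exact PySem.List.sorted_eq_self_of_pairwise [x, y] (fun x => x) (by simp [hxy])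
  · rw [if_neg hxy]
    exact PySem.List.sorted_eq_of_perm_of_pairwise_lt [x, y] [y, x] (fun x => x)
      (List.Perm.swap x y []) (by simp [List.pairwise_cons]; omega)

-- the second element of a two-element list
lemma pyGetD_pair_one (a b d : Int) : PySem.List.pyGetD [a, b] 1 d = b := by
  simp [PySem.List.pyGetD, PySem.List.pyGet?, PySem.List.pyIdx?]

-- modify on an absent key is insert of f applied to the default
lemma modify_not_contains (d : PySem.Dict (Int × Int) (List Int)) (k : Int × Int)
    (f : List Int → List Int) (h : d.contains k = false) :
    d.modify k [] f = d.insert k (f []) := by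
  simp only [PySem.Dict.modify, PySem.Dict.getD_of_not_contains d ([] : List Int) h]

-- A's body for one (x, y, v) equals the grouping step
lemma step_eq (d : PySem.Dict (Int × Int) (List Int)) (x y v : Int) :
    (let keyL := PySem.List.sorted [x, y] (fun x => x) false
     let key : Int × Int := (PySem.List.pyGetD keyL 0 0, PySem.List.pyGetD keyL 1 0)
     if d.contains key then d.modify key [] (fun l => l ++ [v])
     else d.insert key [v]) = pvStepB d ((min x y, max x y), v) := by
  rw [sorted_pair]
  by_cases hxy : x ≤ y
  · rw [if_pos hxy]
    simp only [PySem.List.pyGetD_zero_cons, pyGetD_pair_one,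
      min_eq_left hxy, max_eq_right hxy]
    by_cases hc : d.contains (x, y)
    · rw [if_pos hc]; rfl
    · rw [if_neg hc, pvStepB, modify_not_contains _ _ _ (by simpa using hc)]; simp
  · have hyx : y ≤ x := le_of_not_ge hxy
    rw [if_neg hxy]
    simp only [PySem.List.pyGetD_zero_cons, pyGetD_pair_one,
      min_eq_right hyx, max_eq_left hyx]
    by_cases hc : d.contains (y, x)
    · rw [if_pos hc]; rfl
    · rw [if_neg hc, pvStepB, modify_not_contains _ _ _ (by simpa using hc)]; simp

-- A's inner loop over range(3) = fold of the grouping step over the face's pairs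
lemma face_eq (d : PySem.Dict (Int × Int) (List Int)) (f : List Int) :
    (PySem.List.pyRange 0 3 1).foldl (fun result i =>
        let keyL := PySem.List.sorted
          [PySem.List.pyGetD f i 0, PySem.List.pyGetD f (PySem.Int.mod (i+1) 3) 0]
          (fun x => x) false
        let key : Int × Int := (PySem.List.pyGetD keyL 0 0, PySem.List.pyGetD keyL 1 0)
        let val := PySem.List.pyGetD f (PySem.Int.mod (i+2) 3) 0
        if result.contains key then result.modify key [] (fun l => l ++ [val])
        else result.insert key [val]) d
    = (pvFacePairs f).foldl pvStepB d := by
  have hr : PySem.List.pyRange 0 3 1 = [0, 1, 2] := by decide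
  rw [hr]
  simp only [List.foldl, pvFacePairs]
  rw [step_eq, step_eq, step_eq]
  norm_num [PySem.Int.mod, show Int.fmod 1 3 = 1 from by decide,
    show Int.fmod 2 3 = 2 from by decide, show Int.fmod 3 3 = 0 from by decide,
    show Int.fmod 4 3 = 1 from by decide]

-- two folds with pointwise-equal step functions agree
lemma foldl_ext {α β : Type} (g₁ g₂ : β → α → β) (h : ∀ d x, g₁ d x = g₂ d x) :
    ∀ (l : List α) (d : β), l.foldl g₁ d = l.foldl g₂ d := by
  intro l
  induction l with
  | nil => intro d; rfl
  | cons a t ih => intro d; simp only [List.foldl, h, ih]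

-- fold over a flatMap is the nested fold
lemma foldl_flatMap {α β γ : Type} (g : γ → β → γ) (h : α → List β) :
    ∀ (l : List α) (d : γ),
      (l.flatMap h).foldl g d = l.foldl (fun d x => (h x).foldl g d) d := by
  intro l
  induction l with
  | nil => intro d; rfl
  | cons a t ih => intro d; simp [List.flatMap_cons, List.foldl_append, ih]

-- the items of A's grouping dict are exactly B's per-edge filtered scans
lemma items_group (P : List ((Int × Int) × Int)) :
    (P.foldl pvStepB PySem.Dict.empty).items
      = (PySem.List.dedup (P.map (fun p => p.1))).map
          (fun e => (e, (P.filter (fun p => p.1 == e)).map (fun p => p.2))) := by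
  have hstep : pvStepB = fun (d : PySem.Dict (Int × Int) (List Int)) p =>
      d.modify p.1 [] (fun x => x ++ [p.2]) := rfl
  have hnd : (P.foldl pvStepB PySem.Dict.empty).keys.Nodup := by
    rw [hstep]
    exact PySem.Dict.nodup_keys_foldl_modify_key P (fun p => p.1) []
      (fun _ p l => l ++ [p.2]) PySem.Dict.empty (by simp [pysem])
  rw [PySem.Dict.items_eq_map_keys _ hnd []]
  have hkeys : (P.foldl pvStepB PySem.Dict.empty).keys
      = PySem.List.dedup (P.map (fun p => p.1)) := by
    rw [hstep, PySem.Dict.keys_foldl_modify_key P (fun p => p.1) []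
      (fun _ p l => l ++ [p.2]) PySem.Dict.empty, PySem.List.dedup_eq_ofList]
    simp [PySem.Set.update, PySem.Set.ofList_eq_foldl, PySem.Dict.keys_empty]
  rw [hkeys]
  refine List.map_congr_left (fun e _ => ?_)
  rw [hstep, PySem.Dict.getD_foldl_modify_append P PySem.Dict.empty e]
  simp [pysem]

-- B's staged pipeline written over the flat incidence list
lemma alt_eq (mesh_v mesh_f : List (List Int)) :
    get_vert_opposites_per_edge_alt mesh_v mesh_f
      = (PySem.List.dedup ((mesh_f.flatMap pvFacePairs).map (fun p => p.1))).map
          (fun e => (e.1, e.2,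
            ((mesh_f.flatMap pvFacePairs).filter (fun p => p.1 == e)).map (fun p => p.2))) := by
  unfold get_vert_opposites_per_edge_alt
  change (PySem.List.dedup ((mesh_f.foldl (fun acc f => acc ++ pvFacePairs f) []).map (fun p => p.1))).map
      (fun e => (e.1, e.2,
        ((mesh_f.foldl (fun acc f => acc ++ pvFacePairs f) []).filter (fun p => p.1 == e)).map (fun p => p.2))) = _
  rw [PySem.List.foldl_append_eq_flatMap pvFacePairs mesh_f []]
  simp

-- ===== VERDICT (by name: the statement is the Claim_ definition above) =====
theorem get_vert_opposites_per_edge_spec : Claim_equal_get_vert_opposites_per_edge := by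
  intro mesh_v mesh_f _ _
  unfold Spec_get_vert_opposites_per_edge
  rw [alt_eq]
  simp only [get_vert_opposites_per_edge]
  rw [foldl_ext _ _ face_eq mesh_f PySem.Dict.empty,
    ← foldl_flatMap pvStepB pvFacePairs mesh_f PySem.Dict.empty, items_group, List.map_map]
  rfl
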